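-- pv_equiv track=rewrite | github.com/leeg1027/coding_test_practice | 프로그래머스/2/131704. 택배상자/택배상자.py | solution
-- ===== SOURCE A (Python) =====
-- def solution(order):
--     storage = order.copy()
--     storage.sort()
--     sub = []
--     answer = 0
--     idx = 0
--
--     for i in order:
--         while idx < len(storage) and storage[idx] <= i:
--             sub.append(storage[idx])
--             idx += 1
--
--         if sub and sub[-1] == i:
--             sub.pop()
--             answer += 1
--         else:
--             break
--
--     return answer
-- ===== SOURCE B (Python) =====
-- def solution(order):
--     # First-failure detection instead of a push/pop simulation: loading fails first
--     # at index t iff some later box is strictly between order[t] and the prefix max.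
--     # Positions sorted by value once; a pointer activates positions whose value is
--     # within the prefix max; stale positions (already passed) are dropped lazily.
--     n = len(order)
--     byval = sorted(range(n), key=lambda j: order[j])
--     cand = []          # activated positions, value-ascending; stale tops dropped lazily
--     p = 0              # activation pointer into byval
--     M = None           # prefix max
--     for t, x in enumerate(order):
--         if M is None or x > M:
--             M = x
--         while p < n and order[byval[p]] <= M:
--             cand.append(byval[p])
--             p += 1
--         while cand and cand[-1] <= t:
--             cand.pop()
--         if cand and order[cand[-1]] > x:
--             return t
--     return n
-- ===== Notes on version B (the rewrite author's own statement) =====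
-- stated objective: alternative
-- what changed: B replaces A's push/pop stack simulation over a sorted copy of the values by first-failure detection: loading fails first at index t iff a later box lies strictly between order[t] and the prefix maximum, so B sorts the positions by value once and sweeps with an activation pointer and a lazily pruned candidate list of positions - no pop-on-match, no per-step push loop against the current value.
import Mathlib
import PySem

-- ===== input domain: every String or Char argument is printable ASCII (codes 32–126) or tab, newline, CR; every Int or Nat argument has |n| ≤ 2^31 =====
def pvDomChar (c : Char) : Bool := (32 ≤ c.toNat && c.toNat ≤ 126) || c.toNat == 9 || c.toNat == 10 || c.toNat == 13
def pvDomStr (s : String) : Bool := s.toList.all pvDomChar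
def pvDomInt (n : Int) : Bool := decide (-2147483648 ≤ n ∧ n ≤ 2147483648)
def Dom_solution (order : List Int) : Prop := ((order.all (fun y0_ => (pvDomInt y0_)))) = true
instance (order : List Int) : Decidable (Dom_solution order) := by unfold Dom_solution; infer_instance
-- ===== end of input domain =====

-- B replaces A's push/pop stack simulation by first-failure detection: positions sorted
-- by value once, an activation pointer, and a lazily pruned candidate list (objective: alternative).

-- ===== PORT A =====
-- inner 'while idx < len(storage) and storage[idx] <= i' (stack head = Python list tail)
def pushA (storage : List Int) (i : Int) (idx : Nat) (sub : List Int) : Nat × List Int :=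
  if h : idx < storage.length ∧ storage.getD idx 0 ≤ i then
    pushA storage i (idx + 1) ((storage.getD idx 0) :: sub)
  else (idx, sub)
termination_by storage.length - idx
decreasing_by omega

-- 'for i in order: … else break'
def loopA (storage : List Int) : List Int → Nat → List Int → Int → Int
  | [], _, _, ans => ans
  | i :: rest, idx, sub, ans =>
    let p := pushA storage i idx sub
    match p.2 with
    | t :: s => if t = i then loopA storage rest p.1 s (ans + 1) else ans
    | [] => ans

def solution (order : List Int) : Int :=
  loopA (PySem.List.sorted order (fun x => x)) order 0 [] 0

-- ===== PORT B =====
-- 'while p < n and order[byval[p]] <= M' (candidate head = Python list tail)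
def activateB (order byval : List Int) (m : Int) (p : Nat) (cand : List Int) : Nat × List Int :=
  if h : p < byval.length ∧ PySem.List.pyGetD order (byval.getD p 0) 0 ≤ m then
    activateB order byval m (p + 1) ((byval.getD p 0) :: cand)
  else (p, cand)
termination_by byval.length - p
decreasing_by omega

-- 'while cand and cand[-1] <= t: cand.pop()'
def dropStaleB (t : Int) : List Int → List Int
  | [] => []
  | c :: rest => if c ≤ t then dropStaleB t rest else c :: rest

-- 'for t, x in enumerate(order): …' with the two early returns
def loopB (order byval : List Int) : List Int → Int → Option Int → Nat → List Int → Int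
  | [], _, _, _, _ => (order.length : Int)
  | x :: rest, t, M, p, cand =>
    let m : Int := match M with | none => x | some mv => if x > mv then x else mv
    let a := activateB order byval m p cand
    let cand2 := dropStaleB t a.2
    match cand2 with
    | c :: _ =>
      if PySem.List.pyGetD order c 0 > x then t
      else loopB order byval rest (t + 1) (some m) a.1 cand2
    | [] => loopB order byval rest (t + 1) (some m) a.1 cand2

def solution_alt (order : List Int) : Int :=
  loopB order
    (PySem.List.sorted (PySem.List.pyRange 0 (order.length : Int) 1)
      (fun j => PySem.List.pyGetD order j 0))
    order 0 none 0 []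

-- ===== PRECONDITION & SPEC =====
def Spec_solution (order : List Int) (out : Int) : Prop := out = solution_alt order
instance (order : List Int) (out : Int) : Decidable (Spec_solution order out) := by
  unfold Spec_solution; infer_instance

-- ===== CLAIM (what is proved, stated in full; the proofs are below) =====
def Claim_equal_solution : Prop :=
  ∀ (order : List Int), Dom_solution order → Spec_solution order (solution order)

-- ===== LEMMAS AND PROOFS =====

-- abbreviations for the two sorted auxiliaries
def pvKey (order : List Int) (c : Int) : Int := PySem.List.pyGetD order c 0
def pvStorage (order : List Int) : List Int := PySem.List.sorted order (fun x => x)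
def pvByval (order : List Int) : List Int :=
  PySem.List.sorted (PySem.List.pyRange 0 (order.length : Int) 1) (fun j => PySem.List.pyGetD order j 0)

theorem pvByval_perm (order : List Int) :
    (pvByval order).Perm (PySem.List.pyRange 0 (order.length : Int) 1) :=
  PySem.List.sorted_perm _ _ _

theorem pvByval_nodup (order : List Int) : (pvByval order).Nodup :=
  (pvByval_perm order).nodup_iff.mpr (PySem.List.nodup_pyRange_one _ _)

theorem pvByval_mem (order : List Int) {c : Int} (hc : c ∈ pvByval order) :
    0 ≤ c ∧ c < (order.length : Int) :=
  PySem.List.mem_pyRange_one.mp ((pvByval_perm order).mem_iff.mp hc)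

theorem pvByval_pairwise (order : List Int) :
    (pvByval order).Pairwise (fun a b => pvKey order a ≤ pvKey order b) :=
  PySem.List.sorted_pairwise _ _

-- values of the by-value-sorted positions = the sorted values
theorem pvByval_map_key (order : List Int) :
    (pvByval order).map (pvKey order) = pvStorage order := by
  refine PySem.List.eq_of_perm_of_pairwise_le_of_injective (id : Int → Int)
    (fun a b h => h) ?_ ?_ ?_
  · have h2 := (pvByval_perm order).map (pvKey order)
    have h3 : ((PySem.List.pyRange 0 (order.length : Int) 1).map (pvKey order)) = order := by
      simpa [pvKey] using PySem.List.map_pyGetD_pyRange_zero' order 0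
    rw [h3] at h2
    exact h2.trans (PySem.List.sorted_perm order (fun x => x) false).symm
  · simpa using PySem.List.sorted_map_key_pairwise _ _
  · simpa using PySem.List.sorted_pairwise order (fun x => x)

theorem pvStorage_pairwise (order : List Int) :
    (pvStorage order).Pairwise (· ≤ ·) :=
  PySem.List.sorted_pairwise order (fun x => x)

-- push loops compute a takeWhile segment
theorem pushA_spec (storage : List Int) (x : Int) :
    ∀ (p : Nat) (sub : List Int),
      pushA storage x p sub
        = (p + ((storage.drop p).takeWhile (fun v => decide (v ≤ x))).length,
           ((storage.drop p).takeWhile (fun v => decide (v ≤ x))).reverse ++ sub) := by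
  intro p
  induction hm : storage.length - p using Nat.strong_induction_on generalizing p with
  | _ m ih =>
    intro sub
    by_cases h : p < storage.length ∧ storage.getD p 0 ≤ x
    · have hdrop : storage.drop p = storage[p] :: storage.drop (p + 1) :=
        List.drop_eq_getElem_cons h.1
      have hget : storage.getD p 0 = storage[p] := List.getD_eq_getElem _ _ h.1
      rw [pushA, dif_pos h, ih (storage.length - (p + 1)) (by omega) (p + 1) rfl, hdrop,
        List.takeWhile_cons_of_pos (by simp [← hget]; exact h.2), hget]
      simp only [List.length_cons, List.reverse_cons, List.append_assoc,
        List.singleton_append, Prod.mk.injEq]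
      exact ⟨by omega, trivial⟩
    · rw [pushA, dif_neg h]
      rcases Nat.lt_or_ge p storage.length with hp | hp
      · have hdrop : storage.drop p = storage[p] :: storage.drop (p + 1) :=
          List.drop_eq_getElem_cons hp
        have hget : storage.getD p 0 = storage[p] := List.getD_eq_getElem _ _ hp
        have hv : ¬ storage[p] ≤ x := by rw [← hget]; intro hc; exact h ⟨hp, hc⟩
        rw [hdrop, List.takeWhile_cons_of_neg (by simpa using hv)]
        simp
      · rw [List.drop_eq_nil_of_le hp]
        simp

theorem activateB_spec (order byval : List Int) (m : Int) :
    ∀ (p : Nat) (cand : List Int),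
      activateB order byval m p cand
        = (p + ((byval.drop p).takeWhile (fun c => decide (pvKey order c ≤ m))).length,
           ((byval.drop p).takeWhile (fun c => decide (pvKey order c ≤ m))).reverse ++ cand) := by
  intro p
  induction hm : byval.length - p using Nat.strong_induction_on generalizing p with
  | _ k ih =>
    intro cand
    by_cases h : p < byval.length ∧ PySem.List.pyGetD order (byval.getD p 0) 0 ≤ m
    · have hdrop : byval.drop p = byval[p] :: byval.drop (p + 1) :=
        List.drop_eq_getElem_cons h.1
      have hget : byval.getD p 0 = byval[p] := List.getD_eq_getElem _ _ h.1
      rw [activateB, dif_pos h, ih (byval.length - (p + 1)) (by omega) (p + 1) rfl, hdrop,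
        List.takeWhile_cons_of_pos (by simp [pvKey, ← hget]; exact h.2), hget]
      simp only [List.length_cons, List.reverse_cons, List.append_assoc,
        List.singleton_append, Prod.mk.injEq]
      exact ⟨by omega, trivial⟩
    · rw [activateB, dif_neg h]
      rcases Nat.lt_or_ge p byval.length with hp | hp
      · have hdrop : byval.drop p = byval[p] :: byval.drop (p + 1) :=
          List.drop_eq_getElem_cons hp
        have hget : byval.getD p 0 = byval[p] := List.getD_eq_getElem _ _ hp
        have hv : ¬ pvKey order byval[p] ≤ m := by
          rw [pvKey, ← hget]; intro hc; exact h ⟨hp, hc⟩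
        rw [hdrop, List.takeWhile_cons_of_neg (by simpa using hv)]
        simp
      · rw [List.drop_eq_nil_of_le hp]
        simp

theorem dropStaleB_eq (t : Int) : ∀ (l : List Int),
    dropStaleB t l = l.dropWhile (fun c => decide (c ≤ t)) := by
  intro l
  induction l with
  | nil => rfl
  | cons c rest ih =>
    by_cases h : c ≤ t
    · rw [dropStaleB, if_pos h, ih, List.dropWhile_cons_of_pos (by simpa using h)]
    · rw [dropStaleB, if_neg h, List.dropWhile_cons_of_neg (by simpa using h)]

-- an all-equal prefix can be commuted past one more copy
theorem pv_allx_comm {xs : List Int} {x : Int} (ys : List Int)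
    (h : ∀ a ∈ xs, a = x) : xs ++ x :: ys = x :: (xs ++ ys) := by
  induction xs with
  | nil => rfl
  | cons a rest ih =>
    have ha : a = x := h a (by simp)
    have := ih (fun b hb => h b (by simp [hb]))
    simp [ha, this]

-- heads of dropWhile (≤ t) and filter (t+1 ≤) agree
theorem pv_head_dropWhile_filter (t : Int) : ∀ (l : List Int),
    (l.dropWhile (fun c => decide (c ≤ t))).head?
      = (l.filter (fun c => decide (t + 1 ≤ c))).head? := by
  intro l
  induction l with
  | nil => rfl
  | cons c rest ih =>
    by_cases h : c ≤ t
    · rw [List.dropWhile_cons_of_pos (by simpa using h),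
        List.filter_cons_of_neg (by simp; omega), ih]
    · rw [List.dropWhile_cons_of_neg (by simpa using h),
        List.filter_cons_of_pos (by simp; omega)]
      rfl

-- cutting a list at the length of its takeWhile
theorem pv_drop_cut (l : List Int) (P : Int → Bool) :
    l.drop ((l.takeWhile P).length) = l.dropWhile P := by
  have h := List.takeWhile_append_dropWhile (p := P) (l := l)
  calc l.drop ((l.takeWhile P).length)
      = (l.takeWhile P ++ l.dropWhile P).drop ((l.takeWhile P).length) := by rw [h]
    _ = l.dropWhile P := List.drop_left

theorem pv_take_cut (l : List Int) (P : Int → Bool) :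
    l.take ((l.takeWhile P).length) = l.takeWhile P := by
  have h := List.takeWhile_append_dropWhile (p := P) (l := l)
  calc l.take ((l.takeWhile P).length)
      = (l.takeWhile P ++ l.dropWhile P).take ((l.takeWhile P).length) := by rw [h]
    _ = l.takeWhile P := List.take_left

-- takeWhile over an all-true prefix
theorem pv_takeWhile_append_all (P : Int → Bool) (l1 l2 : List Int)
    (h : ∀ a ∈ l1, P a = true) : (l1 ++ l2).takeWhile P = l1 ++ l2.takeWhile P := by
  induction l1 with
  | nil => rfl
  | cons a r ih =>
    rw [List.cons_append, List.takeWhile_cons_of_pos (h a (by simp)),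
      ih (fun b hb => h b (by simp [hb])), List.cons_append]

-- every element surviving dropWhile (≤ mv) in a sorted list exceeds mv
theorem pv_dropWhile_gt (mv : Int) : ∀ (l : List Int), l.Pairwise (· ≤ ·) →
    ∀ v ∈ l.dropWhile (fun u => decide (u ≤ mv)), mv < v := by
  intro l
  induction l with
  | nil => intro _ v hv; simp at hv
  | cons a r ih =>
    intro hpw v hv
    by_cases ha : a ≤ mv
    · rw [List.dropWhile_cons_of_pos (by simpa using ha)] at hv
      exact ih hpw.of_cons v hv
    · rw [List.dropWhile_cons_of_neg (by simpa using ha)] at hv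
      rcases List.mem_cons.mp hv with rfl | hv'
      · omega
      · have := List.rel_of_pairwise_cons hpw hv'
        omega

-- the two takeWhile segments carry the same values
theorem pv_tw_map (order : List Int) (m : Int) (p : Nat) :
    (((pvByval order).drop p).takeWhile (fun c => decide (pvKey order c ≤ m))).map (pvKey order)
      = ((pvStorage order).drop p).takeWhile (fun v => decide (v ≤ m)) := by
  rw [← pvByval_map_key, ← List.map_drop, List.takeWhile_map]
  rfl

-- positions among the first p by-value entries have small keys
theorem pv_take_small (order : List Int) (mv : Int) {c : Int}
    (hc : c ∈ (pvByval order).take (((pvStorage order).takeWhile (fun v => decide (v ≤ mv))).length)) :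
    pvKey order c ≤ mv := by
  have h1 : pvKey order c ∈ ((pvByval order).take
      (((pvStorage order).takeWhile (fun v => decide (v ≤ mv))).length)).map (pvKey order) :=
    List.mem_map_of_mem hc
  rw [List.map_take, pvByval_map_key, pv_take_cut] at h1
  simpa using List.mem_takeWhile_imp h1

-- positions beyond the cut have large keys
theorem pv_drop_big (order : List Int) (mv : Int) {c : Int}
    (hc : c ∈ (pvByval order).drop (((pvStorage order).takeWhile (fun v => decide (v ≤ mv))).length)) :
    mv < pvKey order c := by
  have h1 : pvKey order c ∈ ((pvByval order).drop
      (((pvStorage order).takeWhile (fun v => decide (v ≤ mv))).length)).map (pvKey order) :=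
    List.mem_map_of_mem hc
  rw [List.map_drop, pvByval_map_key, pv_drop_cut] at h1
  exact pv_dropWhile_gt mv _ (pvStorage_pairwise order) _ h1

-- every in-range position occurs among the by-value positions
theorem pv_mem_byval (order : List Int) (j : Nat) (hj : j < order.length) :
    (j : Int) ∈ pvByval order := by
  refine (pvByval_perm order).mem_iff.mpr ?_
  rw [PySem.List.mem_pyRange_one]
  omega

-- the loop invariant relating A's state to B's state
def pvInv (order : List Int) (t p : Nat) (M : Option Int) (sub cand : List Int) : Prop :=
  (M = none ∧ t = 0 ∧ p = 0 ∧ sub = [] ∧ cand = []) ∨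
  (∃ mv, M = some mv ∧
    (∀ j : Nat, j < t → pvKey order (j : Int) ≤ mv) ∧
    p = ((pvStorage order).takeWhile (fun v => decide (v ≤ mv))).length ∧
    cand.Sublist (((pvByval order).take p).reverse) ∧
    (cand.filter (fun c => decide ((t : Int) ≤ c))).map (pvKey order) = sub ∧
    (∀ j : Nat, t ≤ j → j < order.length → pvKey order (j : Int) ≤ mv → ((j : Int) ∈ cand)))

-- one synchronized loop iteration, after the push phase
theorem pv_step (order rest' : List Int) (t p2 : Nat) (x m : Int) (subN candN : List Int)
    (IH : ∀ (t' p : Nat) (M : Option Int) (sub cand : List Int),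
        rest' = order.drop t' → t' ≤ order.length → pvInv order t' p M sub cand →
        loopA (pvStorage order) rest' p sub (t' : Int)
          = loopB order (pvByval order) rest' (t' : Int) M p cand)
    (htlt : t < order.length)
    (hrest' : rest' = order.drop (t + 1))
    (hkeyt : pvKey order (t : Int) = x)
    (hxm : x ≤ m)
    (hK1 : (candN.filter (fun c => decide ((t : Int) ≤ c))).map (pvKey order) = subN)
    (hK2 : candN.Sublist (((pvByval order).take p2).reverse))
    (hK3 : ∀ j : Nat, t ≤ j → j < order.length → pvKey order (j : Int) ≤ m → ((j : Int) ∈ candN))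
    (hK4 : p2 = ((pvStorage order).takeWhile (fun v => decide (v ≤ m))).length)
    (hK5 : ∀ j : Nat, j < t + 1 → pvKey order (j : Int) ≤ m) :
    (match subN with
     | tt :: s => if tt = x then loopA (pvStorage order) rest' p2 s ((t : Int) + 1) else (t : Int)
     | [] => (t : Int))
    = (match dropStaleB (t : Int) candN with
       | c :: _ =>
         if PySem.List.pyGetD order c 0 > x then (t : Int)
         else loopB order (pvByval order) rest' ((t : Int) + 1) (some m) p2 (dropStaleB (t : Int) candN)
       | [] => loopB order (pvByval order) rest' ((t : Int) + 1) (some m) p2 (dropStaleB (t : Int) candN)) := by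
  have hnodup : candN.Nodup :=
    List.Nodup.sublist hK2 (List.nodup_reverse.mpr
      (List.Nodup.sublist (List.take_sublist ..) (pvByval_nodup order)))
  have hdesc : candN.Pairwise (fun a b => pvKey order b ≤ pvKey order a) := by
    refine List.Pairwise.sublist hK2 ?_
    rw [List.pairwise_reverse]
    exact List.Pairwise.sublist (List.take_sublist ..) (pvByval_pairwise order)
  have hmemT : (t : Int) ∈ candN := hK3 t le_rfl htlt (by rw [hkeyt]; exact hxm)
  obtain ⟨u, v, huv⟩ := List.append_of_mem hmemT
  have hnodup2 : (u ++ (t : Int) :: v).Nodup := huv ▸ hnodup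
  have htuv : (t : Int) ∉ u ++ v := (List.nodup_cons.mp (List.nodup_middle.mp hnodup2)).1
  have htu : (t : Int) ∉ u := fun h => htuv (List.mem_append.mpr (Or.inl h))
  have htv : (t : Int) ∉ v := fun h => htuv (List.mem_append.mpr (Or.inr h))
  set A' := u.filter (fun c => decide ((t : Int) + 1 ≤ c)) with hA'def
  set B' := v.filter (fun c => decide ((t : Int) + 1 ≤ c)) with hB'def
  have hcu : u.filter (fun c => decide ((t : Int) ≤ c)) = A' := by
    refine List.filter_congr (fun c hc => ?_)
    have hne : c ≠ (t : Int) := fun h => htu (h ▸ hc)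
    simp only [decide_eq_decide]
    omega
  have hcv : v.filter (fun c => decide ((t : Int) ≤ c)) = B' := by
    refine List.filter_congr (fun c hc => ?_)
    have hne : c ≠ (t : Int) := fun h => htv (h ▸ hc)
    simp only [decide_eq_decide]
    omega
  have hF1 : candN.filter (fun c => decide ((t : Int) ≤ c)) = A' ++ (t : Int) :: B' := by
    rw [huv, List.filter_append, List.filter_cons_of_pos (by simp), hcu, hcv]
  have hF2 : candN.filter (fun c => decide ((t : Int) + 1 ≤ c)) = A' ++ B' := by
    rw [huv, List.filter_append, List.filter_cons_of_neg (by simp)]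
  have hsubN : subN = A'.map (pvKey order) ++ x :: B'.map (pvKey order) := by
    rw [← hK1, hF1, List.map_append, List.map_cons, hkeyt]
  set cand2 := dropStaleB (t : Int) candN with hc2def
  have hds : cand2 = candN.dropWhile (fun c => decide (c ≤ (t : Int))) := dropStaleB_eq _ _
  have hsplit : candN.takeWhile (fun c => decide (c ≤ (t : Int))) ++ cand2 = candN := by
    rw [hds]; exact List.takeWhile_append_dropWhile
  have hfilter2 : cand2.filter (fun c => decide ((t : Int) + 1 ≤ c)) = A' ++ B' := by
    have h1 : candN.filter (fun c => decide ((t : Int) + 1 ≤ c))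
        = (candN.takeWhile (fun c => decide (c ≤ (t : Int)))).filter
            (fun c => decide ((t : Int) + 1 ≤ c))
          ++ cand2.filter (fun c => decide ((t : Int) + 1 ≤ c)) := by
      conv_lhs => rw [← hsplit]
      rw [List.filter_append]
    have h2 : (candN.takeWhile (fun c => decide (c ≤ (t : Int)))).filter
        (fun c => decide ((t : Int) + 1 ≤ c)) = [] := by
      refine List.filter_eq_nil_iff.mpr (fun c hc => ?_)
      have := List.mem_takeWhile_imp hc
      simp only [decide_eq_true_eq] at this ⊢
      omega
    rw [h1, h2, List.nil_append] at hF2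
    exact hF2
  have hhead : cand2.head? = (A' ++ B').head? := by
    rw [hds, pv_head_dropWhile_filter, hF2]
  have hc2sub : cand2.Sublist candN := by rw [hds]; exact List.dropWhile_sublist _
  have hK3' : ∀ j : Nat, t + 1 ≤ j → j < order.length → pvKey order (j : Int) ≤ m →
      ((j : Int) ∈ cand2) := by
    intro j h1 h2 h3
    have hj : (j : Int) ∈ candN := hK3 j (by omega) h2 h3
    rw [← hsplit] at hj
    rcases List.mem_append.mp hj with h | h
    · have := List.mem_takeWhile_imp h
      simp only [decide_eq_true_eq] at this
      omega
    · exact h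
  have hInv' : pvInv order (t + 1) p2 (some m) ((A' ++ B').map (pvKey order)) cand2 := by
    refine Or.inr ⟨m, rfl, hK5, hK4, hc2sub.trans hK2, ?_, ?_⟩
    · have : ((t + 1 : Nat) : Int) = (t : Int) + 1 := by push_cast; ring
      rw [this, hfilter2]
    · intro j h1 h2 h3
      exact hK3' j h1 h2 h3
  have hIH := IH (t + 1) p2 (some m) ((A' ++ B').map (pvKey order)) cand2 hrest'
    (by omega) hInv'
  push_cast at hIH
  rcases hAB : (A' ++ B') with _ | ⟨c0, F2'⟩
  · have hc20 : cand2 = [] := List.head?_eq_none_iff.mp (by rw [hhead, hAB]; rfl)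
    have hA0 : A' = [] := (List.append_eq_nil_iff.mp hAB).1
    have hB0 : B' = [] := (List.append_eq_nil_iff.mp hAB).2
    have hsub1 : subN = [x] := by rw [hsubN, hA0, hB0]; rfl
    rw [hAB] at hIH
    simp only [hsub1, hc20, List.map_nil] at hIH ⊢
    simpa using hIH
  · obtain ⟨tl, hcc⟩ : ∃ tl, cand2 = c0 :: tl := by
      cases hcand2c : cand2 with
      | nil =>
        rw [hcand2c] at hhead; rw [hAB] at hhead
        simp at hhead
      | cons a tl =>
        rw [hcand2c] at hhead; rw [hAB] at hhead
        simp only [List.head?_cons, Option.some.injEq] at hhead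
        exact ⟨tl, by rw [hhead]⟩
    have hdescF1 : (A' ++ (t : Int) :: B').Pairwise
        (fun a b => pvKey order b ≤ pvKey order a) := by
      rw [← hF1]
      exact List.Pairwise.sublist List.filter_sublist hdesc
    have hdescF2 : (c0 :: F2').Pairwise (fun a b => pvKey order b ≤ pvKey order a) := by
      rw [← hAB, ← hF2]
      exact List.Pairwise.sublist List.filter_sublist hdesc
    have hc0mem : c0 ∈ A' ++ B' := by rw [hAB]; simp
    by_cases hgt : x < pvKey order c0
    · -- both sides fail at t
      have hc0A : c0 ∈ A' := by
        rcases List.mem_append.mp hc0mem with h | h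
        · exact h
        · exfalso
          have hpw := (List.pairwise_append.mp hdescF1).2.1
          have := List.rel_of_pairwise_cons hpw h
          rw [hkeyt] at this
          omega
      obtain ⟨a0, A'', hA''⟩ : ∃ a0 A'', A' = a0 :: A'' := by
        cases hA : A' with
        | nil => rw [hA] at hc0A; simp at hc0A
        | cons a b => exact ⟨a, b, rfl⟩
      have ha0 : a0 = c0 := by
        have h5 : A' ++ B' = c0 :: F2' := hAB
        rw [hA''] at h5
        simpa using congrArg List.head? h5
      have hsub2 : subN = pvKey order a0 :: (A''.map (pvKey order)
          ++ x :: B'.map (pvKey order)) := by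
        rw [hsubN, hA'']; rfl
      have hne : pvKey order a0 ≠ x := by rw [ha0]; omega
      have hgt' : PySem.List.pyGetD order c0 0 > x := hgt
      simp only [hsub2, hcc]
      rw [if_neg hne, if_pos hgt']
    · -- both sides succeed: the popped top is x, B's candidate top is not larger
      rw [not_lt] at hgt
      have hallA : ∀ a ∈ A', pvKey order a = x := by
        intro a ha
        have hge : x ≤ pvKey order a := by
          have h6 := (List.pairwise_append.mp hdescF1).2.2 a ha (t : Int) (by simp)
          rw [hkeyt] at h6
          exact h6
        have hle2 : pvKey order a ≤ x := by
          have hmem2 : a ∈ c0 :: F2' := by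
            rw [← hAB]; exact List.mem_append.mpr (Or.inl ha)
          rcases List.mem_cons.mp hmem2 with rfl | h
          · exact hgt
          · have h6 := List.rel_of_pairwise_cons hdescF2 h
            omega
        omega
      have hsubx : subN = x :: (A'.map (pvKey order) ++ B'.map (pvKey order)) := by
        rw [hsubN]
        refine pv_allx_comm _ (fun a ha => ?_)
        obtain ⟨b, hb, rfl⟩ := List.mem_map.mp ha
        exact hallA b hb
      have hngt : ¬ PySem.List.pyGetD order c0 0 > x := by
        show ¬ pvKey order c0 > x
        omega
      rw [List.map_append] at hIH
      rw [hcc] at hIH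
      simp only [hsubx, hcc]
      rw [if_true, if_neg hngt]
      exact hIH

-- values beyond the two takeWhile segments agree as well
theorem pv_dw_map (order : List Int) (m : Int) (p : Nat) :
    (((pvByval order).drop p).dropWhile (fun c => decide (pvKey order c ≤ m))).map (pvKey order)
      = ((pvStorage order).drop p).dropWhile (fun v => decide (v ≤ m)) := by
  rw [← pvByval_map_key, ← List.map_drop, List.dropWhile_map]
  rfl

-- one-step equations for the two loops
theorem loopA_cons_eq (storage : List Int) (x : Int) (rest : List Int) (p : Nat)
    (sub : List Int) (ans : Int) :
    loopA storage (x :: rest) p sub ans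
      = (match (pushA storage x p sub).2 with
         | tt :: s =>
           if tt = x then loopA storage rest (pushA storage x p sub).1 s (ans + 1) else ans
         | [] => ans) := rfl

theorem loopB_cons_none (order byval : List Int) (x : Int) (rest : List Int) (t : Int)
    (p : Nat) (cand : List Int) :
    loopB order byval (x :: rest) t none p cand
      = (match dropStaleB t (activateB order byval x p cand).2 with
         | c :: _ =>
           if PySem.List.pyGetD order c 0 > x then t
           else loopB order byval rest (t + 1) (some x) (activateB order byval x p cand).1
             (dropStaleB t (activateB order byval x p cand).2)
         | [] => loopB order byval rest (t + 1) (some x) (activateB order byval x p cand).1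
             (dropStaleB t (activateB order byval x p cand).2)) := rfl

theorem loopB_cons_some (order byval : List Int) (x : Int) (rest : List Int) (t : Int)
    (mv : Int) (p : Nat) (cand : List Int) :
    loopB order byval (x :: rest) t (some mv) p cand
      = (match dropStaleB t (activateB order byval (if x > mv then x else mv) p cand).2 with
         | c :: _ =>
           if PySem.List.pyGetD order c 0 > x then t
           else loopB order byval rest (t + 1) (some (if x > mv then x else mv))
             (activateB order byval (if x > mv then x else mv) p cand).1
             (dropStaleB t (activateB order byval (if x > mv then x else mv) p cand).2)
         | [] => loopB order byval rest (t + 1) (some (if x > mv then x else mv))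
             (activateB order byval (if x > mv then x else mv) p cand).1
             (dropStaleB t (activateB order byval (if x > mv then x else mv) p cand).2)) := rfl

-- the main lockstep lemma
theorem pv_loop_eq (order : List Int) :
    ∀ (rest : List Int) (t p : Nat) (M : Option Int) (sub cand : List Int),
      rest = order.drop t → t ≤ order.length →
      pvInv order t p M sub cand →
      loopA (pvStorage order) rest p sub (t : Int)
        = loopB order (pvByval order) rest (t : Int) M p cand := by
  intro rest
  induction rest with
  | nil =>
    intro t p M sub cand hrest ht _
    have hlen : order.length ≤ t := by
      have := congrArg List.length hrest
      simp at this
      omega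
    have htn : t = order.length := le_antisymm ht hlen
    subst htn
    rfl
  | cons x rest' ih =>
    intro t p M sub cand hrest ht hInv
    have htlt : t < order.length := by
      have := congrArg List.length hrest
      simp at this
      omega
    have hdt : x :: rest' = order[t] :: order.drop (t + 1) := by
      rw [hrest]; exact List.drop_eq_getElem_cons htlt
    obtain ⟨hxa, hrest'⟩ : x = order[t] ∧ rest' = order.drop (t + 1) := List.cons.inj hdt
    have hkeyt : pvKey order (t : Int) = x := by
      rw [pvKey, PySem.List.pyGetD_natCast, List.getD_eq_getElem _ _ htlt, ← hxa]
    rcases hInv with ⟨hM, ht0, hp0, hsub0, hcand0⟩ | ⟨mv, hM, hpre, hp, hsl, hfil, hmem⟩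
    · -- first iteration: everything empty, new threshold x
      subst hM ht0 hp0 hsub0 hcand0
      rw [loopA_cons_eq, loopB_cons_none, pushA_spec, activateB_spec]
      have hlenBA : (((pvByval order).drop 0).takeWhile
            (fun c => decide (pvKey order c ≤ x))).length
          = (((pvStorage order).drop 0).takeWhile (fun v => decide (v ≤ x))).length := by
        rw [← pv_tw_map order x 0, List.length_map]
      rw [hlenBA]
      have hmapBA : (((pvByval order).drop 0).takeWhile
            (fun c => decide (pvKey order c ≤ x))).map (pvKey order)
          = ((pvStorage order).drop 0).takeWhile (fun v => decide (v ≤ x)) :=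
        pv_tw_map order x 0
      refine pv_step order rest' 0
        (0 + (((pvStorage order).drop 0).takeWhile (fun v => decide (v ≤ x))).length) x x
        ((((pvStorage order).drop 0).takeWhile (fun v => decide (v ≤ x))).reverse ++ [])
        ((((pvByval order).drop 0).takeWhile (fun c => decide (pvKey order c ≤ x))).reverse ++ [])
        ih htlt hrest' hkeyt le_rfl ?_ ?_ ?_ ?_ ?_
      · -- K1
        rw [List.append_nil, List.append_nil, List.filter_eq_self.mpr ?_, List.map_reverse,
          hmapBA]
        intro c hc
        have hcB := List.mem_reverse.mp hc
        have hbv : c ∈ pvByval order := by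
          simpa using (List.takeWhile_sublist _).mem hcB
        have := pvByval_mem order hbv
        simp only [decide_eq_true_eq]
        omega
      · -- K2
        have h2 : (((pvStorage order).drop 0).takeWhile (fun v => decide (v ≤ x))).length
            = (((pvByval order).drop 0).takeWhile
                (fun c => decide (pvKey order c ≤ x))).length := by
          rw [← hmapBA, List.length_map]
        rw [Nat.zero_add, h2]
        have h3 : (pvByval order).take
            ((((pvByval order).drop 0).takeWhile
              (fun c => decide (pvKey order c ≤ x))).length)
            = ((pvByval order).drop 0).takeWhile (fun c => decide (pvKey order c ≤ x)) :=
          pv_take_cut (pvByval order) _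
        rw [h3, List.append_nil]
      · -- K3
        intro j _ hj hkey
        have hmem : (j : Int) ∈ pvByval order := pv_mem_byval order j hj
        have hsplitB : ((pvByval order).drop 0).takeWhile (fun c => decide (pvKey order c ≤ x))
            ++ ((pvByval order).drop 0).dropWhile (fun c => decide (pvKey order c ≤ x))
            = pvByval order := by
          have h0 := List.takeWhile_append_dropWhile
            (p := fun c => decide (pvKey order c ≤ x)) (l := (pvByval order).drop 0)
          rw [List.drop_zero] at h0
          exact h0
        rw [← hsplitB] at hmem
        rcases List.mem_append.mp hmem with h | h
        · exact List.mem_append.mpr (Or.inl (List.mem_reverse.mpr h))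
        · exfalso
          have h7 : pvKey order (j : Int)
              ∈ ((pvStorage order).drop 0).dropWhile (fun v => decide (v ≤ x)) := by
            rw [← pv_dw_map order x 0]
            exact List.mem_map_of_mem h
          have h8 := pv_dropWhile_gt x ((pvStorage order).drop 0)
            (List.Pairwise.sublist (List.drop_sublist ..) (pvStorage_pairwise order)) _ h7
          omega
      · -- K4
        simp
      · -- K5
        intro j hj
        have hj0 : j = 0 := by omega
        subst hj0
        exact le_of_eq hkeyt
    · -- subsequent iteration
      subst hM
      by_cases hcmp : x > mv
      · -- new running maximum x
        rw [loopA_cons_eq, loopB_cons_some, pushA_spec, activateB_spec, if_pos hcmp]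
        have hmapBA : (((pvByval order).drop p).takeWhile
              (fun c => decide (pvKey order c ≤ x))).map (pvKey order)
            = ((pvStorage order).drop p).takeWhile (fun v => decide (v ≤ x)) :=
          pv_tw_map order x p
        have hlenBA : (((pvByval order).drop p).takeWhile
              (fun c => decide (pvKey order c ≤ x))).length
            = (((pvStorage order).drop p).takeWhile (fun v => decide (v ≤ x))).length := by
          rw [← hmapBA, List.length_map]
        rw [hlenBA]
        have hdp : (pvStorage order).drop p
            = (pvStorage order).dropWhile (fun v => decide (v ≤ mv)) := by
          rw [hp]; exact pv_drop_cut _ _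
        refine pv_step order rest' t
          (p + (((pvStorage order).drop p).takeWhile (fun v => decide (v ≤ x))).length) x x
          ((((pvStorage order).drop p).takeWhile (fun v => decide (v ≤ x))).reverse ++ sub)
          ((((pvByval order).drop p).takeWhile (fun c => decide (pvKey order c ≤ x))).reverse
            ++ cand)
          ih htlt hrest' hkeyt le_rfl ?_ ?_ ?_ ?_ ?_
        · -- K1
          rw [List.filter_append, List.filter_eq_self.mpr ?_, List.map_append,
            List.map_reverse, hmapBA, hfil]
          intro c hc
          have hcB := List.mem_reverse.mp hc
          have hgt : mv < pvKey order c := by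
            refine pv_drop_big order mv ?_
            rw [← hp]
            exact (List.takeWhile_sublist _).mem hcB
          have hbv : c ∈ pvByval order :=
            List.mem_of_mem_drop ((List.takeWhile_sublist _).mem hcB)
          have hb := pvByval_mem order hbv
          simp only [decide_eq_true_eq]
          by_contra hlt
          have hjc : (c.toNat : Int) = c := Int.toNat_of_nonneg hb.1
          have hjt : c.toNat < t := by omega
          have := hpre c.toNat hjt
          rw [hjc] at this
          omega
        · -- K2
          have htake : (pvByval order).take
              (p + (((pvStorage order).drop p).takeWhile (fun v => decide (v ≤ x))).length)
              = (pvByval order).take p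
                ++ ((pvByval order).drop p).takeWhile (fun c => decide (pvKey order c ≤ x)) := by
            rw [← hlenBA, List.take_add]
            congr 1
            exact pv_take_cut ((pvByval order).drop p) _
          rw [htake, List.reverse_append]
          exact List.Sublist.append_left hsl _
        · -- K3
          intro j hj1 hj2 hj3
          by_cases hc : pvKey order (j : Int) ≤ mv
          · exact List.mem_append.mpr (Or.inr (hmem j hj1 hj2 hc))
          · have hbv : (j : Int) ∈ pvByval order := pv_mem_byval order j hj2
            have hnottake : (j : Int) ∉ (pvByval order).take p := by
              intro h
              rw [hp] at h
              exact hc (pv_take_small order mv h)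
            have hdropmem : (j : Int) ∈ (pvByval order).drop p := by
              have h9 : (j : Int) ∈ (pvByval order).take p ++ (pvByval order).drop p := by
                rw [List.take_append_drop]; exact hbv
              rcases List.mem_append.mp h9 with h | h
              · exact absurd h hnottake
              · exact h
            have h10 : (j : Int) ∈ ((pvByval order).drop p).takeWhile
                  (fun c => decide (pvKey order c ≤ x))
                ++ ((pvByval order).drop p).dropWhile
                  (fun c => decide (pvKey order c ≤ x)) := by
              rw [List.takeWhile_append_dropWhile]; exact hdropmem
            rcases List.mem_append.mp h10 with h | h
            · exact List.mem_append.mpr (Or.inl (List.mem_reverse.mpr h))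
            · exfalso
              have h7 : pvKey order (j : Int)
                  ∈ ((pvStorage order).drop p).dropWhile (fun v => decide (v ≤ x)) := by
                rw [← pv_dw_map order x p]
                exact List.mem_map_of_mem h
              have h8 := pv_dropWhile_gt x ((pvStorage order).drop p)
                (List.Pairwise.sublist (List.drop_sublist ..) (pvStorage_pairwise order)) _ h7
              omega
        · -- K4
          have hsplitS : (pvStorage order).takeWhile (fun v => decide (v ≤ x))
              = (pvStorage order).takeWhile (fun v => decide (v ≤ mv))
                ++ ((pvStorage order).drop p).takeWhile (fun v => decide (v ≤ x)) := by
            conv_lhs => rw [← List.takeWhile_append_dropWhile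
              (p := fun v => decide (v ≤ mv)) (l := pvStorage order)]
            rw [pv_takeWhile_append_all _ _ _ ?_, hdp]
            intro a ha
            have := List.mem_takeWhile_imp ha
            simp only [decide_eq_true_eq] at this ⊢
            omega
          rw [hsplitS, List.length_append, hp]
        · -- K5
          intro j hj
          rcases Nat.lt_or_ge j t with h | h
          · exact le_trans (hpre j h) (le_of_lt hcmp)
          · have hjt : j = t := by omega
            subst hjt
            exact le_of_eq hkeyt
      · -- running maximum unchanged: both push phases are empty
        rw [loopA_cons_eq, loopB_cons_some, pushA_spec, activateB_spec, if_neg hcmp]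
        rw [not_lt] at hcmp
        have hdp : (pvStorage order).drop p
            = (pvStorage order).dropWhile (fun v => decide (v ≤ mv)) := by
          rw [hp]; exact pv_drop_cut _ _
        have hbig : ∀ v ∈ (pvStorage order).drop p, mv < v := by
          intro v hv
          rw [hdp] at hv
          exact pv_dropWhile_gt mv _ (pvStorage_pairwise order) v hv
        have htwA0 : ((pvStorage order).drop p).takeWhile (fun v => decide (v ≤ x)) = [] := by
          cases hd : (pvStorage order).drop p with
          | nil => rfl
          | cons h0 tl =>
            have h0m : h0 ∈ (pvStorage order).drop p := by rw [hd]; simp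
            have := hbig h0 h0m
            rw [List.takeWhile_cons_of_neg]
            simp only [decide_eq_true_eq]
            omega
        have htwB0 : ((pvByval order).drop p).takeWhile
            (fun c => decide (pvKey order c ≤ mv)) = [] := by
          have hm := pv_tw_map order mv p
          have htwS : ((pvStorage order).drop p).takeWhile (fun v => decide (v ≤ mv)) = [] := by
            cases hd : (pvStorage order).drop p with
            | nil => rfl
            | cons h0 tl =>
              have h0m : h0 ∈ (pvStorage order).drop p := by rw [hd]; simp
              have := hbig h0 h0m
              rw [List.takeWhile_cons_of_neg]
              simp only [decide_eq_true_eq]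
              omega
          rw [htwS] at hm
          exact List.map_eq_nil_iff.mp hm
        rw [htwA0, htwB0]
        simp only [List.reverse_nil, List.nil_append, List.length_nil, Nat.add_zero]
        refine pv_step order rest' t p x mv sub cand ih htlt hrest' hkeyt hcmp hfil hsl hmem hp ?_
        intro j hj
        rcases Nat.lt_or_ge j t with h | h
        · exact hpre j h
        · have hjt : j = t := by omega
          subst hjt
          rw [hkeyt]
          exact hcmp

-- ===== VERDICT (by name: the statement is the Claim_ definition above) =====
theorem solution_spec : Claim_equal_solution := by
  intro order _
  unfold Spec_solution solution solution_alt
  have := pv_loop_eq order order 0 0 none [] [] (by simp) (Nat.zero_le _)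
    (Or.inl ⟨rfl, rfl, rfl, rfl, rfl⟩)
  simpa [pvStorage, pvByval] using this
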